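-- pv_equiv track=rewrite | github.com/Vincent-chao-lang/myagent | src/daily/report.py | _extract_core_knowledge
-- ===== SOURCE A (Python) =====
-- from typing import List, Dict, Any
--
-- def _extract_core_knowledge(learnings: List[Dict[str, Any]]) -> str:
--     """提取核心知识"""
--     sections = []
--
--     # 按类别分组
--     by_category = {}
--     for learning in learnings:
--         cat = learning.get("category", "general")
--         if cat not in by_category:
--             by_category[cat] = []
--         by_category[cat].append(learning)
--
--     # 格式化每个类别
--     for category, items in by_category.items():
--         if not items:
--             continue
--
--         section = f"\n### {category.title()}\n\n"
--
--         for item in items[:5]:  # 每个类别最多5条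
--             title = item.get("title", "")
--             content = item.get("content", "")[:200]
--
--             section += f"**{title}**\n"
--             section += f"{content}...\n\n"
--
--         sections.append(section)
--
--     return "\n".join(sections)
-- ===== SOURCE B (Python) =====
-- from typing import List, Dict, Any
--
-- def _extract_core_knowledge(learnings: List[Dict[str, Any]]) -> str:
--     """Single pass: per-category section text and item count, joined in first-seen order."""
--     sections = {}  # category -> [accumulated text, item count]
--     for learning in learnings:
--         cat = learning.get("category", "general")
--         entry = sections.get(cat)
--         if entry is None:
--             entry = [f"\n### {cat.title()}\n\n", 0]
--             sections[cat] = entry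
--         if entry[1] < 5:
--             title = learning.get("title", "")
--             content = learning.get("content", "")[:200]
--             entry[0] += f"**{title}**\n{content}...\n\n"
--             entry[1] += 1
--     return "\n".join(text for text, _ in sections.values())
-- ===== Notes on version B (the rewrite author's own statement) =====
-- stated objective: alternative
-- what changed: Replaces A's two passes (first group all learnings into a category->list dict, then format each group's first 5 items) by a single pass that accumulates each category's formatted section text and item count directly, joining the section strings at the end.
import Mathlib
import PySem

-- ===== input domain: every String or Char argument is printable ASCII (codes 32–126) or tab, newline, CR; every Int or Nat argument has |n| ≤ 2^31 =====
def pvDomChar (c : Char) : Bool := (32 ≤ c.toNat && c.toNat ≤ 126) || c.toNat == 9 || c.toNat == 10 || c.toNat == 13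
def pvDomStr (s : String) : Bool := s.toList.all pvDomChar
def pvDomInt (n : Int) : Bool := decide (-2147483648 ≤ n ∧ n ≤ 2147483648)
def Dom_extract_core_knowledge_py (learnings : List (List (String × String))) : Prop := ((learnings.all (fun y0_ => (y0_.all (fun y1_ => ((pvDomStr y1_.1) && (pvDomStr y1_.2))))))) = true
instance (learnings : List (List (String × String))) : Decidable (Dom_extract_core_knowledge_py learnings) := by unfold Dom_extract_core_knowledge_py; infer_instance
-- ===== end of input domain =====

-- B replaces A's two passes (group by category, then format) by one pass that accumulates
-- each category's section text and item count directly; same output, alternative decomposition.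

-- str.title(), ported by hand (exact on ASCII: a letter is uppercased after a non-letter,
-- lowercased after a letter; non-letters are kept and reset the state)
def pyTitleAux : List Char → Bool → List Char
  | [], _ => []
  | c :: t, prev =>
    (if c.isAlpha then (if prev then c.toLower else c.toUpper) else c) :: pyTitleAux t c.isAlpha

def pyTitle (s : String) : String := String.ofList (pyTitleAux s.toList false)

-- ===== PORT A =====
def extract_core_knowledge_py (learnings : List (List (String × String))) : String :=
  let by_category : PySem.Dict String (List (List (String × String))) :=
    learnings.foldl
      (fun d learning =>
        d.modify ((PySem.Dict.mk learning).getD "category" "general") [] (· ++ [learning]))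
      PySem.Dict.empty
  let sections : List String :=
    by_category.items.foldl
      (fun secs ci =>
        if ci.2.isEmpty then secs
        else
          let sec := "\n### " ++ pyTitle ci.1 ++ "\n\n"
          let sec := (PySem.List.slice ci.2 none (some 5)).foldl
            (fun sec item =>
              let title := (PySem.Dict.mk item).getD "title" ""
              let content := PySem.Str.slice ((PySem.Dict.mk item).getD "content" "") none (some 200)
              sec ++ ("**" ++ title ++ "**\n") ++ (content ++ "...\n\n"))
            sec
          secs ++ [sec])
      []
  PySem.Str.join "\n" sections

-- ===== PORT B =====
def extract_core_knowledge_py_alt_step (d : PySem.Dict String (String × Int))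
    (learning : List (String × String)) : PySem.Dict String (String × Int) :=
  let cat := (PySem.Dict.mk learning).getD "category" "general"
  let entry := (d.get? cat).getD ("\n### " ++ pyTitle cat ++ "\n\n", 0)
  let entry :=
    if entry.2 < 5 then
      (entry.1 ++ "**" ++ (PySem.Dict.mk learning).getD "title" "" ++ "**\n"
        ++ PySem.Str.slice ((PySem.Dict.mk learning).getD "content" "") none (some 200) ++ "...\n\n",
       entry.2 + 1)
    else entry
  d.insert cat entry

def extract_core_knowledge_py_alt (learnings : List (List (String × String))) : String :=
  PySem.Str.join "\n"
    (((learnings.foldl extract_core_knowledge_py_alt_step PySem.Dict.empty).values).map Prod.fst)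

-- ===== PRECONDITION & SPEC =====
def Spec_extract_core_knowledge_py (learnings : List (List (String × String))) (out : String) : Prop := out = extract_core_knowledge_py_alt learnings
instance (learnings : List (List (String × String))) (out : String) : Decidable (Spec_extract_core_knowledge_py learnings out) := by unfold Spec_extract_core_knowledge_py; infer_instance

-- ===== CLAIM (what is proved, stated in full; the proofs are below) =====
def Claim_equal_extract_core_knowledge_py : Prop := ∀ (learnings : List (List (String × String))), Dom_extract_core_knowledge_py learnings → Spec_extract_core_knowledge_py learnings (extract_core_knowledge_py learnings)

-- ===== LEMMAS AND PROOFS =====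

-- shorthand for the item line both programs emit
def fmtItem (item : List (String × String)) : String :=
  "**" ++ (PySem.Dict.mk item).getD "title" "" ++ "**\n"
    ++ PySem.Str.slice ((PySem.Dict.mk item).getD "content" "") none (some 200) ++ "...\n\n"

def hdr (c : String) : String := "\n### " ++ pyTitle c ++ "\n\n"

-- the section text A produces for category c from its grouped items
def render (c : String) (its : List (List (String × String))) : String :=
  (its.take 5).foldl (fun s it => s ++ fmtItem it) (hdr c)

-- image of one grouped entry under B's state
def Fent (p : String × List (List (String × String))) : String × (String × Int) :=
  (p.1, (render p.1 p.2, ((min p.2.length 5 : Nat) : Int)))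

theorem main_inv (ls : List (List (String × String)))
    (dA : PySem.Dict String (List (List (String × String))))
    (dB : PySem.Dict String (String × Int))
    (hnd : dA.keys.Nodup) (hB : dB.items = dA.items.map Fent) :
    (ls.foldl extract_core_knowledge_py_alt_step dB).items
      = (ls.foldl
          (fun d learning =>
            d.modify ((PySem.Dict.mk learning).getD "category" "general") [] (· ++ [learning]))
          dA).items.map Fent := by
  induction ls generalizing dA dB with
  | nil => simpa using hB
  | cons l t ih =>
    simp only [List.foldl_cons]
    have hkeys : dB.keys = dA.keys := by
      simp only [PySem.Dict.keys, hB, List.map_map]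
      rfl
    set c := (PySem.Dict.mk l).getD "category" "general" with hc
    have hmodify : dA.modify c [] (· ++ [l]) = dA.insert c (dA.getD c [] ++ [l]) := rfl
    by_cases hct : dA.contains c = true
    · -- existing category
      obtain ⟨its, hits⟩ : ∃ its, dA.get? c = some its := by
        rcases h : dA.get? c with _ | its
        · rw [PySem.Dict.get?_eq_none_iff_contains] at h; rw [hct] at h; cases h
        · exact ⟨its, rfl⟩
      have hgetD : dA.getD c [] = its := PySem.Dict.getD_of_get?_eq_some _ [] hits
      have hmemA : (c, its) ∈ dA.items := PySem.Dict.mem_items_of_get?_eq_some _ hits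
      have hndB : dB.keys.Nodup := hkeys ▸ hnd
      have hmemB : (c, (render c its, ((min its.length 5 : Nat) : Int))) ∈ dB.items := by
        rw [hB]; exact List.mem_map.2 ⟨(c, its), hmemA, rfl⟩
      have hgetB : dB.get? c = some (render c its, ((min its.length 5 : Nat) : Int)) :=
        PySem.Dict.get?_of_mem_items _ hmemB hndB
      have hctB : dB.contains c = true := by
        rw [PySem.Dict.contains_eq_decide_mem_keys, hkeys,
          ← PySem.Dict.contains_eq_decide_mem_keys]; exact hct
      -- apply IH to the updated dicts
      rw [hmodify, hgetD]
      apply ih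
      · rwa [PySem.Dict.keys_insert_of_contains _ _ hct]
      · rw [extract_core_knowledge_py_alt_step, ← hc, hgetB,
          PySem.Dict.items_insert_of_contains _ _ hctB,
          PySem.Dict.items_insert_of_contains _ _ hct, hB, List.map_map, List.map_map]
        apply List.map_congr_left
        rintro ⟨p1, p2⟩ hp
        simp only [Function.comp, Fent]
        by_cases hpc : (p1 == c) = true
        · have hp1 : p1 = c := by simpa using hpc
          subst hp1
          have hp2 : p2 = its := by
            have h := PySem.Dict.get?_of_mem_items _ hp hnd
            rw [hits] at h
            simpa using h.symm
          rw [hp2]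
          simp only [hpc, if_true, Option.getD_some]
          by_cases hlt : its.length < 5
          · have h5 : ((min its.length 5 : Nat) : Int) < 5 := by
              have hm : min its.length 5 = its.length := by omega
              rw [hm]; exact_mod_cast hlt
            rw [if_pos h5]
            simp only [Prod.mk.injEq, true_and]
            constructor
            · simp only [render]
              rw [List.take_of_length_le (l := its ++ [l]) (by simp; omega),
                List.take_of_length_le (l := its) (by omega), List.foldl_append]
              simp only [List.foldl_cons, List.foldl_nil, fmtItem]
              simp [String.append_assoc]
            · simp only [List.length_append, List.length_cons, List.length_nil]
              push_cast; omega
          · have h5 : ¬ ((min its.length 5 : Nat) : Int) < 5 := by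
              have hm : min its.length 5 = 5 := by omega
              rw [hm]; norm_num
            rw [if_neg h5]
            simp only [Prod.mk.injEq, true_and]
            constructor
            · simp only [render]
              rw [List.take_append_of_le_length (by omega)]
            · simp only [List.length_append, List.length_cons, List.length_nil]
              congr 1; omega
        · simp [hpc]
    · -- fresh category
      have hctA : dA.contains c = false := by simpa using hct
      have hctB : dB.contains c = false := by
        rw [PySem.Dict.contains_eq_decide_mem_keys, hkeys,
          ← PySem.Dict.contains_eq_decide_mem_keys]; exact hctA
      have hgetB : dB.get? c = none := by
        rw [PySem.Dict.get?_eq_none_iff_contains]; exact hctB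
      rw [hmodify]
      apply ih
      · rw [PySem.Dict.keys_insert_of_not_contains _ _ hctA]
        refine List.Nodup.append hnd (List.nodup_singleton c) ?_
        intro x hx hx'
        have hxc : x = c := by simpa using hx'
        subst hxc
        rw [PySem.Dict.contains_iff_mem_keys] at hct
        exact hct hx
      · rw [extract_core_knowledge_py_alt_step, ← hc, hgetB,
          PySem.Dict.items_insert_of_not_contains _ _ hctB,
          PySem.Dict.items_insert_of_not_contains _ _ hctA,
          hB, List.map_append]
        have hgA : dA.getD c [] = ([] : List (List (String × String))) :=
          PySem.Dict.getD_of_not_contains _ _ hctA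
        rw [hgA]
        congr 1
        simp only [List.map_cons, List.map_nil, Option.getD_none]
        rw [if_pos (by norm_num)]
        have hval : Fent (c, ([] : List (List (String × String))) ++ [l])
            = (c, (hdr c ++ fmtItem l, (1 : Int))) := by
          simp only [Fent, render, List.nil_append, List.take_succ_cons, List.take_nil,
            List.foldl_cons, List.foldl_nil]
          norm_num
        rw [hval]
        simp only [List.cons.injEq, and_true, Prod.mk.injEq, true_and, hdr, fmtItem]
        constructor
        · simp only [String.append_assoc]
        · norm_num

theorem vals_ne (ls : List (List (String × String)))
    (dA : PySem.Dict String (List (List (String × String))))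
    (h0 : ∀ p ∈ dA.items, p.2 ≠ ([] : List (List (String × String)))) :
    ∀ p ∈ (ls.foldl
        (fun d learning =>
          d.modify ((PySem.Dict.mk learning).getD "category" "general") [] (· ++ [learning]))
        dA).items, p.2 ≠ [] := by
  induction ls generalizing dA with
  | nil => simpa using h0
  | cons l t ih =>
    simp only [List.foldl_cons]
    apply ih
    intro p hp
    have hmodify : dA.modify ((PySem.Dict.mk l).getD "category" "general") [] (· ++ [l])
        = dA.insert ((PySem.Dict.mk l).getD "category" "general")
            (dA.getD ((PySem.Dict.mk l).getD "category" "general") [] ++ [l]) := rfl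
    rw [hmodify] at hp
    rcases (PySem.Dict.mem_items_insert _ _ _ _).1 hp with h | ⟨h, _⟩
    · rw [h]; simp
    · exact h0 p h

-- ===== VERDICT (by name: the statement is the Claim_ definition above) =====
theorem extract_core_knowledge_py_spec : Claim_equal_extract_core_knowledge_py := by
  intro learnings _
  unfold Spec_extract_core_knowledge_py extract_core_knowledge_py extract_core_knowledge_py_alt
  simp only [letFun]
  set dA := learnings.foldl
      (fun d learning =>
        d.modify ((PySem.Dict.mk learning).getD "category" "general") [] (· ++ [learning]))
      PySem.Dict.empty with hdA
  have hne : ∀ p ∈ dA.items, p.2 ≠ [] := vals_ne learnings PySem.Dict.empty (by intro p hp; simp [PySem.Dict.empty] at hp)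
  have hinv := main_inv learnings PySem.Dict.empty PySem.Dict.empty
    PySem.Dict.nodup_keys_empty (by simp [PySem.Dict.empty])
  rw [← hdA] at hinv
  -- A's sections foldl = map render over the grouped items
  have hsec : dA.items.foldl
      (fun secs ci =>
        if ci.2.isEmpty then secs
        else
          secs ++ [(PySem.List.slice ci.2 none (some 5)).foldl
            (fun sec item =>
              sec ++ ("**" ++ (PySem.Dict.mk item).getD "title" "" ++ "**\n")
                ++ (PySem.Str.slice ((PySem.Dict.mk item).getD "content" "") none (some 200)
                    ++ "...\n\n"))
            ("\n### " ++ pyTitle ci.1 ++ "\n\n")])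
      [] = dA.items.map (fun ci => render ci.1 ci.2) := by
    have hcong : ∀ (acc : List String), ∀ x ∈ dA.items,
        (if x.2.isEmpty then acc
         else
          acc ++ [(PySem.List.slice x.2 none (some 5)).foldl
            (fun sec item =>
              sec ++ ("**" ++ (PySem.Dict.mk item).getD "title" "" ++ "**\n")
                ++ (PySem.Str.slice ((PySem.Dict.mk item).getD "content" "") none (some 200)
                    ++ "...\n\n"))
            ("\n### " ++ pyTitle x.1 ++ "\n\n")])
        = acc ++ [render x.1 x.2] := by
      intro acc x hx
      rw [if_neg (by simpa using hne x hx)]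
      congr 2
      have hslice : PySem.List.slice x.2 none (some 5) = x.2.take 5 := by
        rw [PySem.List.slice_to _ (by norm_num)]; rfl
      rw [hslice, render, ← hdr]
      apply PySem.List.foldl_congr_mem
      intro s it _
      rw [fmtItem]
      simp [String.append_assoc]
    rw [PySem.List.foldl_congr_mem _ _ _ _ hcong,
      PySem.List.foldl_append_singleton_eq_map]
    simp
  rw [hsec]
  simp only [PySem.Dict.values, hinv, List.map_map]
  rfl
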